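-- pv_equiv track=rewrite | github.com/thilinawishvekeerthi/mlops-eep | src/eep/generate/base.py | make_ambiguous_back_table
-- ===== SOURCE A (Python) =====
-- def make_ambiguous_back_table(forward_table):
--     """Back a back-table for BioPython CodonTable.
--     Args:
--         forward_table: Forward table to make ambiguous back-table for.
--     Returns:
--         dict: Ambiguous back-table.
--     """
--     bt = {}
--     for codon in forward_table:
--         if forward_table[codon] in bt:
--             bt[forward_table[codon]].append(codon)
--         else:
--             bt[forward_table[codon]] = [codon]
--     return bt
-- ===== SOURCE B (Python) =====
-- def make_ambiguous_back_table(forward_table):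
--     """Back a back-table for BioPython CodonTable.
--     Args:
--         forward_table: Forward table to make ambiguous back-table for.
--     Returns:
--         dict: Ambiguous back-table.
--     """
--     order = dict.fromkeys(forward_table.values())
--     return {aa: [c for c in forward_table if forward_table[c] == aa] for aa in order}
-- ===== Notes on version B (the rewrite author's own statement) =====
-- stated objective: simpler
-- what changed: B replaces A's incremental build-a-dict-while-scanning loop (append-or-create per codon) by two declarative passes: dedup the amino-acid values in first-seen order with dict.fromkeys, then one comprehension per amino acid collecting its codons.
import Mathlib
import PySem

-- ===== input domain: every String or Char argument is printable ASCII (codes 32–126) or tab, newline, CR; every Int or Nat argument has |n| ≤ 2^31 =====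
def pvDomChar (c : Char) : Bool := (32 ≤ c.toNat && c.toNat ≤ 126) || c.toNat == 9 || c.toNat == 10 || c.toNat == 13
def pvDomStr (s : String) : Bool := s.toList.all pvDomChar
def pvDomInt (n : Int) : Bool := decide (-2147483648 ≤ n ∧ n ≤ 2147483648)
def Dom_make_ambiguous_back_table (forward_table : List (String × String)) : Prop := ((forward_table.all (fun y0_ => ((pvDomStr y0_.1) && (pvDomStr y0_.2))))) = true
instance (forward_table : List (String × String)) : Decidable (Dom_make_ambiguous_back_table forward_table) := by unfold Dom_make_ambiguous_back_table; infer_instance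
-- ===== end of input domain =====

-- B builds the back-table in two plain passes (dedup the amino acids, then one comprehension
-- per amino acid) instead of A's incremental dict mutation; objective: simpler, not faster.

-- ===== PORT A =====
-- A: bt = {}; for codon in forward_table: append codon to bt[forward_table[codon]] (create the list on first hit)
def make_ambiguous_back_table (forward_table : List (String × String)) : List (String × List String) :=
  let d : PySem.Dict String String := ⟨forward_table⟩
  let bt : PySem.Dict String (List String) :=
    d.keys.foldl (fun bt codon =>
      let aa := (d.get? codon).getD ""   -- forward_table[codon]; codon ∈ keys, so always present
      if bt.contains aa then bt.modify aa [] (fun l => l ++ [codon])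
      else bt.insert aa [codon]) PySem.Dict.empty
  bt.items

-- ===== PORT B =====
-- B: order = dict.fromkeys(forward_table.values()); {aa: [c for c in forward_table if forward_table[c] == aa] for aa in order}
def make_ambiguous_back_table_alt (forward_table : List (String × String)) : List (String × List String) :=
  let d : PySem.Dict String String := ⟨forward_table⟩
  let order := PySem.List.dedup d.values
  order.map (fun aa => (aa, d.keys.filter (fun c => ((d.get? c).getD "" == aa))))

-- ===== PRECONDITION & SPEC =====
-- Pre_ excludes association lists with duplicate keys: they do not represent any Python dict,
-- and A's parameter is a dict, so duplicate keys cannot reach the Python function at all.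
def Pre_make_ambiguous_back_table (forward_table : List (String × String)) : Prop :=
  (forward_table.map Prod.fst).Nodup
instance (forward_table : List (String × String)) : Decidable (Pre_make_ambiguous_back_table forward_table) := by unfold Pre_make_ambiguous_back_table; infer_instance

def pvWitness_make_ambiguous_back_table : (List (String × String)) :=
  [("AAA", "K"), ("AAG", "K"), ("TTT", "F")]

def Spec_make_ambiguous_back_table (forward_table : List (String × String)) (out : List (String × List String)) : Prop := out = make_ambiguous_back_table_alt forward_table
instance (forward_table : List (String × String)) (out : List (String × List String)) : Decidable (Spec_make_ambiguous_back_table forward_table out) := by unfold Spec_make_ambiguous_back_table; infer_instance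

-- ===== CLAIM (what is proved, stated in full; the proofs are below) =====
def Claim_equal_make_ambiguous_back_table : Prop := ∀ (forward_table : List (String × String)), Dom_make_ambiguous_back_table forward_table → Pre_make_ambiguous_back_table forward_table → Spec_make_ambiguous_back_table forward_table (make_ambiguous_back_table forward_table)

-- ===== LEMMAS AND PROOFS =====

-- A's loop body, with the (always-successful) lookup forward_table[codon] already resolved to the pair's value
def pvStep (bt : PySem.Dict String (List String)) (p : String × String) : PySem.Dict String (List String) :=
  if bt.contains p.2 then bt.modify p.2 [] (fun l => l ++ [p.1]) else bt.insert p.2 [p.1]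

lemma pvStep_keys (bt : PySem.Dict String (List String)) (p : String × String) :
    (pvStep bt p).keys = PySem.Set.add bt.keys p.2 := by
  unfold pvStep
  by_cases h : bt.contains p.2 = true
  · have hm : p.2 ∈ bt.keys := (PySem.Dict.contains_iff_mem_keys bt p.2).mp h
    rw [if_pos h, PySem.Dict.keys_modify, PySem.Dict.keys_insert_of_contains _ _ h]
    simp [PySem.Set.add, hm]
  · have hm : p.2 ∉ bt.keys := fun hmem => h ((PySem.Dict.contains_iff_mem_keys bt p.2).mpr hmem)
    rw [if_neg h, PySem.Dict.keys_insert_of_not_contains _ _ (by simpa using h)]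
    simp [PySem.Set.add, hm]

lemma pvStep_getD (bt : PySem.Dict String (List String)) (p : String × String) (aa : String) :
    (pvStep bt p).getD aa [] = if aa = p.2 then bt.getD aa [] ++ [p.1] else bt.getD aa [] := by
  unfold pvStep
  by_cases h : bt.contains p.2 = true
  · simp only [h, if_true, PySem.Dict.getD_modify]
    split_ifs with heq
    · subst heq; rfl
    · rfl
  · simp only [h, if_false, Bool.false_eq_true, PySem.Dict.getD_insert]
    split_ifs with heq
    · subst heq
      simp [PySem.Dict.getD_of_not_contains _ _ (by simpa using h)]
    · rfl

lemma pvFold_keys (l : List (String × String)) (bt : PySem.Dict String (List String)) :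
    (l.foldl pvStep bt).keys = PySem.Set.update bt.keys (l.map Prod.snd) := by
  induction l generalizing bt with
  | nil => simp [PySem.Set.update]
  | cons p rest ih =>
    simp only [List.foldl_cons, List.map_cons, ih, pvStep_keys, PySem.Set.update]

lemma pvFold_getD (l : List (String × String)) (bt : PySem.Dict String (List String)) (aa : String) :
    (l.foldl pvStep bt).getD aa [] =
      bt.getD aa [] ++ (l.filter (fun p => p.2 == aa)).map Prod.fst := by
  induction l generalizing bt with
  | nil => simp
  | cons p rest ih =>
    simp only [List.foldl_cons, ih, pvStep_getD, List.filter_cons]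
    by_cases heq : aa = p.2
    · simp [heq]
    · have : (p.2 == aa) = false := by simp [Ne.symm heq]
      simp [heq, this]

-- A's fold over the keys, lookups resolved, is the fold of pvStep over the pairs
lemma pvA_eq_fold (ft : List (String × String)) (hn : (ft.map Prod.fst).Nodup) :
    make_ambiguous_back_table ft = (ft.foldl pvStep PySem.Dict.empty).items := by
  unfold make_ambiguous_back_table
  simp only [PySem.Dict.keys_mk, List.foldl_map]
  congr 1
  apply PySem.List.foldl_congr_mem'
  intro p hp acc
  have hget : (PySem.Dict.mk ft).get? p.1 = some p.2 :=
    PySem.Dict.get?_of_mem_items _ (by simpa using hp) (by simpa [PySem.Dict.keys_mk] using hn)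
  simp only [hget, Option.getD_some, pvStep]

-- B, lookups resolved: one pair (aa, codons-with-value-aa) per distinct amino acid
lemma pvB_char (ft : List (String × String)) (hn : (ft.map Prod.fst).Nodup) :
    make_ambiguous_back_table_alt ft =
      (PySem.Set.ofList (ft.map Prod.snd)).map
        (fun aa => (aa, ((ft.filter (fun p => p.2 == aa)).map Prod.fst))) := by
  unfold make_ambiguous_back_table_alt
  simp only [PySem.Dict.keys_mk, PySem.Dict.values_mk, PySem.List.dedup_eq_ofList]
  apply List.map_congr_left
  intro aa _
  congr 1
  rw [List.filter_map]
  congr 1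
  apply List.filter_congr
  intro p hp
  have hget : (PySem.Dict.mk ft).get? p.1 = some p.2 :=
    PySem.Dict.get?_of_mem_items _ (by simpa using hp) (by simpa [PySem.Dict.keys_mk] using hn)
  simp [hget, Function.comp]

lemma pvMain (ft : List (String × String)) (hn : (ft.map Prod.fst).Nodup) :
    make_ambiguous_back_table ft = make_ambiguous_back_table_alt ft := by
  rw [pvA_eq_fold ft hn, pvB_char ft hn]
  have hkeys : (ft.foldl pvStep PySem.Dict.empty).keys = PySem.Set.ofList (ft.map Prod.snd) := by
    rw [pvFold_keys]
    simp [PySem.Set.update, PySem.Set.ofList_eq_foldl, PySem.Dict.keys_empty]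
  have hnd : (ft.foldl pvStep PySem.Dict.empty).keys.Nodup := by
    rw [hkeys]; exact PySem.Set.nodup_ofList _
  rw [PySem.Dict.items_eq_map_keys _ hnd [], hkeys]
  apply List.map_congr_left
  intro aa _
  rw [pvFold_getD]
  simp

-- ===== VERDICT (by name: the statement is the Claim_ definition above) =====
theorem make_ambiguous_back_table_spec : Claim_equal_make_ambiguous_back_table := by
  intro ft _ hpre
  unfold Spec_make_ambiguous_back_table
  exact pvMain ft hpre
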